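-- pv_equiv track=rewrite | github.com/FEniCS/ffcx | ffcx/ir/dof_permutations.py | quadrilateral_rotation
-- ===== SOURCE A (Python) =====
-- import math
--
-- def quadrilateral_rotation(dofs, sub_block_size=1, reverse_blocks=False):
--     """Rotate the dofs in a quadrilateral."""
--     n = len(dofs) // sub_block_size
--     s = math.floor(math.sqrt(n))
--     assert s ** 2 == n
--
--     perm = []
--     for st in range(n - s, n):
--         for dof in range(st, -1, -s):
--             if reverse_blocks:
--                 perm += [dof * sub_block_size + k for k in range(sub_block_size)][::-1]
--             else:
--                 perm += [dof * sub_block_size + k for k in range(sub_block_size)]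
--     assert len(perm) == len(dofs)
--
--     return [dofs[i] for i in perm]
-- ===== SOURCE B (Python) =====
-- import math
--
-- def quadrilateral_rotation(dofs, sub_block_size=1, reverse_blocks=False):
--     """Rotate the dofs in a quadrilateral (matrix-rotation formulation)."""
--     n = len(dofs) // sub_block_size
--     s = math.floor(math.sqrt(n))
--     assert s ** 2 == n
--
--     # Lay the block indices out as an s x s grid and rotate it 90 degrees.
--     grid = [[r * s + c for c in range(s)] for r in range(s)]
--     rotated = [[grid[s - 1 - i][j] for i in range(s)] for j in range(s)]
--
--     perm = []
--     for row in rotated: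
--         for dof in row:
--             block = [dof * sub_block_size + k for k in range(sub_block_size)]
--             perm += block[::-1] if reverse_blocks else block
--     assert len(perm) == len(dofs)
--
--     return [dofs[i] for i in perm]
-- ===== Notes on version B (the rewrite author's own statement) =====
-- stated objective: alternative
-- what changed: B builds the s x s grid of block indices as a nested list, rotates it 90 degrees as a matrix and flattens row by row, instead of A's descending stride-s index arithmetic inside a nested range loop.
import Mathlib
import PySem

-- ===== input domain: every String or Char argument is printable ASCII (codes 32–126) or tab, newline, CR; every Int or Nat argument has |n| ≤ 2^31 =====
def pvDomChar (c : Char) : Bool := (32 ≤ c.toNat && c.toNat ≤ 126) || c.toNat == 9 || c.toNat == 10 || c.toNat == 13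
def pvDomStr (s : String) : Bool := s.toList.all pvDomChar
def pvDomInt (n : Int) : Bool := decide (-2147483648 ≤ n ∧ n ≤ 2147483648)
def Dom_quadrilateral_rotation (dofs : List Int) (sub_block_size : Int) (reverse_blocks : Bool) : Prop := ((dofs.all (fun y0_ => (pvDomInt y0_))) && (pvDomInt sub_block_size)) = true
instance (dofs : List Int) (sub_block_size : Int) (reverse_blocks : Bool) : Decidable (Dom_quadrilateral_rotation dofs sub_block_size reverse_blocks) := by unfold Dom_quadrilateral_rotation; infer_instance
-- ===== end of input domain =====

-- B rotates the s×s grid of block indices as a nested-list matrix and flattens it,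
-- instead of A's descending stride-s arithmetic in a nested range loop (objective: alternative).

-- ===== PORT A =====
-- Literal port of A.  math.floor(math.sqrt(n)) is ported as Nat.sqrt (exact for the
-- machine-representable list lengths here; for negative n Python raises, outside Pre_).
-- The two asserts always pass under Pre_ (they are what Pre_ states); perm indexing dofs[i]
-- is via pyGetD, exact since every i in perm is in range under Pre_.
def quadrilateral_rotation (dofs : List Int) (sub_block_size : Int) (reverse_blocks : Bool) : List Int :=
  let n : Int := PySem.Int.floordiv (dofs.length : Int) sub_block_size
  let s : Int := ((Nat.sqrt n.toNat : Nat) : Int)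
  let perm : List Int :=
    (PySem.List.pyRange (n - s) n 1).foldl (fun acc st =>
      (PySem.List.pyRange st (-1) (-s)).foldl (fun acc dof =>
        let block := (PySem.List.pyRange 0 sub_block_size 1).map (fun k => dof * sub_block_size + k)
        acc ++ (if reverse_blocks then block.reverse else block)) acc) []
  perm.map (fun i => PySem.List.pyGetD dofs i 0)

-- ===== PORT B =====
def quadrilateral_rotation_alt (dofs : List Int) (sub_block_size : Int) (reverse_blocks : Bool) : List Int :=
  let n : Int := PySem.Int.floordiv (dofs.length : Int) sub_block_size
  let s : Int := ((Nat.sqrt n.toNat : Nat) : Int)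
  let grid : List (List Int) :=
    (PySem.List.pyRange 0 s 1).map (fun r => (PySem.List.pyRange 0 s 1).map (fun c => r * s + c))
  let rotated : List (List Int) :=
    (PySem.List.pyRange 0 s 1).map (fun j =>
      (PySem.List.pyRange 0 s 1).map (fun i => PySem.List.pyGetD (PySem.List.pyGetD grid (s - 1 - i) []) j 0))
  let perm : List Int :=
    rotated.foldl (fun acc row =>
      row.foldl (fun acc dof =>
        let block := (PySem.List.pyRange 0 sub_block_size 1).map (fun k => dof * sub_block_size + k)
        acc ++ (if reverse_blocks then block.reverse else block)) acc) []
  perm.map (fun i => PySem.List.pyGetD dofs i 0)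

-- ===== PRECONDITION & SPEC =====
-- Pre_ = exactly the inputs where Python A returns: sub_block_size nonzero and, unless dofs is
-- empty, positive (0 → ZeroDivisionError; negative with nonempty dofs → math.sqrt of a negative
-- n → ValueError); sub_block_size divides len(dofs) (else the len(perm) assert fails); and the
-- block count is a perfect square (else the s**2 == n assert fails).
def Pre_quadrilateral_rotation (dofs : List Int) (sub_block_size : Int) (reverse_blocks : Bool) : Prop :=
  (1 ≤ sub_block_size ∨ (dofs = [] ∧ sub_block_size ≤ -1)) ∧ sub_block_size ∣ (dofs.length : Int) ∧
    ∃ t : Nat, t ≤ dofs.length ∧ ((t : Int)) ^ 2 = (dofs.length : Int) / sub_block_size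
instance (dofs : List Int) (sub_block_size : Int) (reverse_blocks : Bool) : Decidable (Pre_quadrilateral_rotation dofs sub_block_size reverse_blocks) := by unfold Pre_quadrilateral_rotation; infer_instance
def pvWitness_quadrilateral_rotation : List Int × Int × Bool := ([10, 11, 12, 13, 20, 21, 22, 23], 2, false)
def Spec_quadrilateral_rotation (dofs : List Int) (sub_block_size : Int) (reverse_blocks : Bool) (out : List Int) : Prop := out = quadrilateral_rotation_alt dofs sub_block_size reverse_blocks
instance (dofs : List Int) (sub_block_size : Int) (reverse_blocks : Bool) (out : List Int) : Decidable (Spec_quadrilateral_rotation dofs sub_block_size reverse_blocks out) := by unfold Spec_quadrilateral_rotation; infer_instance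

-- ===== CLAIM (what is proved, stated in full; the proofs are below) =====
def Claim_equal_quadrilateral_rotation : Prop := ∀ (dofs : List Int) (sub_block_size : Int) (reverse_blocks : Bool), Dom_quadrilateral_rotation dofs sub_block_size reverse_blocks → Pre_quadrilateral_rotation dofs sub_block_size reverse_blocks → Spec_quadrilateral_rotation dofs sub_block_size reverse_blocks (quadrilateral_rotation dofs sub_block_size reverse_blocks)

-- ===== LEMMAS AND PROOFS =====

-- nested foldl that appends g y at each step is init ++ the double flatMap
theorem pv_foldl_foldl_append {α β γ : Type} (xs : List α) (f : α → List β) (g : β → List γ)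
    (init : List γ) :
    xs.foldl (fun a x => (f x).foldl (fun a y => a ++ g y) a) init
      = init ++ xs.flatMap (fun x => (f x).flatMap g) := by
  induction xs generalizing init with
  | nil => simp
  | cons x xs ih => simp [List.foldl_cons, List.append_assoc, List.flatMap]

-- range(a, -1, -s) for 0 ≤ a, 0 < s
theorem pv_pyRange_neg (a s : Int) (hs : 0 < s) (ha : 0 ≤ a) :
    PySem.List.pyRange a (-1) (-s) = (List.range ((a + s) / s).toNat).map (fun k : Nat => a - s * (k : Int)) := by
  have h1 : ¬(-s = 0) := by omega
  have h2 : ¬(0 < -s) := by omega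
  have h3 : (-1 : Int) < a := by omega
  unfold PySem.List.pyRange
  simp only [h1, h2, h3, if_false, if_true, neg_neg]
  have h4 : a - (-1) + s - 1 = a + s := by ring
  rw [h4]
  refine List.map_congr_left ?_
  intro k _
  ring

-- the key index-list identity: A's nested countdown ranges are exactly the rotated grid rows
theorem pv_idx_eq (s : Int) (hs : 0 ≤ s) :
    ((PySem.List.pyRange 0 s 1).map (fun j =>
        (PySem.List.pyRange 0 s 1).map (fun i =>
          PySem.List.pyGetD (PySem.List.pyGetD
            ((PySem.List.pyRange 0 s 1).map (fun r => (PySem.List.pyRange 0 s 1).map (fun c => r * s + c)))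
            (s - 1 - i) []) j 0)))
      = (PySem.List.pyRange (s ^ 2 - s) (s ^ 2) 1).map (fun st => PySem.List.pyRange st (-1) (-s)) := by
  have hsq : s ≤ s ^ 2 := by nlinarith
  apply List.ext_getElem
  · simp [PySem.List.length_pyRange_one]
  · intro k h1 h2
    rw [List.getElem_map, List.getElem_map]
    have hk : k < s.toNat := by
      simpa [PySem.List.length_pyRange_one] using h1
    have hs1 : 1 ≤ s := by omega
    have hks : (k : Int) < s := by omega
    rw [PySem.List.getElem_pyRange_one, PySem.List.getElem_pyRange_one]
    rw [pv_pyRange_neg _ s (by omega) (by omega)]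
    have hc : (s ^ 2 - s + (k : Int) + s) / s = s := by
      have he : s ^ 2 - s + (k : Int) + s = (k : Int) + s * s := by ring
      rw [he, Int.add_mul_ediv_left _ _ (by omega : s ≠ 0),
        Int.ediv_eq_zero_of_lt (by positivity) hks, zero_add]
    apply List.ext_getElem
    · simp [PySem.List.length_pyRange_one, hc]
    · intro i hi1 hi2
      have hi : i < s.toNat := by
        simpa [PySem.List.length_pyRange_one] using hi1
      simp only [List.getElem_map, List.getElem_range, PySem.List.getElem_pyRange_one]
      rw [PySem.List.pyGetD_map_pyRange_of_nonneg _ _ _ _ (by omega) (by omega)]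
      rw [PySem.List.pyGetD_map_pyRange_of_nonneg _ _ _ _ (by omega) (by omega)]
      ring

-- both perms, with n and s generalized (n = s²): the core equality of the two ports
theorem pv_main (dofs : List Int) (sbs : Int) (rb : Bool) (n s : Int) (hs0 : 0 ≤ s)
    (hn2 : n = s ^ 2) :
    (((PySem.List.pyRange (n - s) n 1).foldl (fun acc st =>
        (PySem.List.pyRange st (-1) (-s)).foldl (fun acc dof =>
          acc ++ (if rb then ((PySem.List.pyRange 0 sbs 1).map (fun k => dof * sbs + k)).reverse
                  else (PySem.List.pyRange 0 sbs 1).map (fun k => dof * sbs + k))) acc) []).map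
      (fun i => PySem.List.pyGetD dofs i 0))
    = ((((PySem.List.pyRange 0 s 1).map (fun j =>
          (PySem.List.pyRange 0 s 1).map (fun i =>
            PySem.List.pyGetD (PySem.List.pyGetD
              ((PySem.List.pyRange 0 s 1).map (fun r => (PySem.List.pyRange 0 s 1).map (fun c => r * s + c)))
              (s - 1 - i) []) j 0))).foldl (fun acc row =>
        row.foldl (fun acc dof =>
          acc ++ (if rb then ((PySem.List.pyRange 0 sbs 1).map (fun k => dof * sbs + k)).reverse
                  else (PySem.List.pyRange 0 sbs 1).map (fun k => dof * sbs + k))) acc) []).map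
      (fun i => PySem.List.pyGetD dofs i 0)) := by
  subst hn2
  congr 1
  rw [pv_foldl_foldl_append, pv_foldl_foldl_append, List.nil_append, List.nil_append]
  rw [pv_idx_eq s hs0, List.flatMap_map]

-- ===== VERDICT (by name: the statement is the Claim_ definition above) =====
theorem quadrilateral_rotation_spec : Claim_equal_quadrilateral_rotation := by
  intro dofs sbs rb _hdom hpre
  obtain ⟨hor, hdvd, t, _ht, hsq⟩ := hpre
  rcases hor with h1 | ⟨hnil, _hneg⟩
  · -- 1 ≤ sbs: the main case
    simp only [Spec_quadrilateral_rotation, quadrilateral_rotation, quadrilateral_rotation_alt]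
    have hfe : PySem.Int.floordiv ((dofs.length : Int)) sbs = (dofs.length : Int) / sbs :=
      PySem.Int.floordiv_eq_ediv_of_pos (by omega)
    rw [hfe]
    have htt : ((dofs.length : Int) / sbs).toNat = t * t := by
      have h2 : (dofs.length : Int) / sbs = ((t * t : Nat) : Int) := by push_cast; nlinarith [hsq]
      rw [h2, Int.toNat_natCast]
    have hsqrt : ((Nat.sqrt ((dofs.length : Int) / sbs).toNat : Nat) : Int) = (t : Int) := by
      rw [htt]
      norm_num [Nat.sqrt_eq]
    refine pv_main dofs sbs rb _ _ (by positivity) ?_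
    rw [hsqrt]
    exact hsq.symm
  · -- dofs = [] with sbs ≤ -1: both programs return []
    subst hnil
    simp [Spec_quadrilateral_rotation, quadrilateral_rotation, quadrilateral_rotation_alt,
      PySem.Int.floordiv, PySem.List.pyRange]
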